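-- pv_equiv track=rewrite | github.com/malittlevina/unimind | native_models/llm_engine.py | _is_causally_related
-- ===== SOURCE A (Python) =====
-- def _is_causally_related(event1: str, event2: str) -> bool:
--     """Check if two events are causally related."""
--     # Simple causality detection based on keywords
--     event1_lower = event1.lower()
--     event2_lower = event2.lower()
--
--     # Look for cause-effect patterns
--     cause_indicators = ["cause", "lead", "result", "trigger"]
--     effect_indicators = ["effect", "outcome", "consequence", "result"]
--
--     for cause_indicator in cause_indicators:
--         if cause_indicator in event1_lower:
--             for effect_indicator in effect_indicators:
--                 if effect_indicator in event2_lower: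
--                     return True
--
--     return False
-- ===== SOURCE B (Python) =====
-- def _scan(text: str, words) -> bool:
--     # Single left-to-right pass over the text: at each position, test whether
--     # one of the keywords starts there.
--     for i in range(len(text)):
--         if any(text.startswith(w, i) for w in words):
--             return True
--     return False
--
--
-- def _is_causally_related(event1: str, event2: str) -> bool:
--     """Check if two events are causally related."""
--     causes = ["cause", "lead", "result", "trigger"]
--     effects = ["effect", "outcome", "consequence", "result"]
--     return _scan(event1.lower(), causes) and _scan(event2.lower(), effects)
-- ===== Notes on version B (the rewrite author's own statement) =====
-- stated objective: alternative
-- what changed: Instead of A's nested keyword loops with Python's substring operator 'in', B does one explicit left-to-right positional scan of each lowered string, testing at every index whether any keyword starts there (startswith), and ANDs the two scan results.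
import Mathlib
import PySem

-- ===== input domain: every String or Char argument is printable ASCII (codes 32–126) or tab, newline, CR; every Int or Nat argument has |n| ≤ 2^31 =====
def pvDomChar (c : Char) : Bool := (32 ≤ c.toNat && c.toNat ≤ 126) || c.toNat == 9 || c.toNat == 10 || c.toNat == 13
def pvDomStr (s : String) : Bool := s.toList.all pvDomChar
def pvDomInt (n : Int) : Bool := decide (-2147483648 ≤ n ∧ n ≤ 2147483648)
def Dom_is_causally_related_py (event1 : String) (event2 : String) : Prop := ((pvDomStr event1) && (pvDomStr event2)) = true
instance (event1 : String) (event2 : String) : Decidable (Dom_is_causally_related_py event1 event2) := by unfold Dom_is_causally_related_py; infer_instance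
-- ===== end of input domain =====

-- B replaces A's nested `in`-keyword loops by an explicit single positional scan of each lowered string (startswith at each index), ANDing the two scans (objective: alternative).


-- ===== PORT A =====
def causeIndicators : List String := ["cause", "lead", "result", "trigger"]
def effectIndicators : List String := ["effect", "outcome", "consequence", "result"]

-- inner loop of A: 'for effect_indicator in effect_indicators: if effect_indicator in event2_lower: return True'
def innerLoopA (event2_lower : String) : List String → Bool
  | [] => false
  | eff :: rest =>
      if PySem.Str.isIn eff event2_lower then true else innerLoopA event2_lower rest

-- outer loop of A
def outerLoopA (event1_lower event2_lower : String) : List String → Bool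
  | [] => false
  | c :: rest =>
      if PySem.Str.isIn c event1_lower then
        if innerLoopA event2_lower effectIndicators then true
        else outerLoopA event1_lower event2_lower rest
      else outerLoopA event1_lower event2_lower rest

def is_causally_related_py (event1 : String) (event2 : String) : Bool :=
  outerLoopA (PySem.Str.lower event1) (PySem.Str.lower event2) causeIndicators

-- ===== PORT B =====
-- 'any(text.startswith(w, i) for w in words)' at one position i (position = the suffix chars)
def wordsMatchAt (words : List (List Char)) (chars : List Char) : Bool :=
  words.any (fun w => w.isPrefixOf chars)

-- Source B's _scan: 'for i in range(len(text)): if any(text.startswith(w, i) ...): return True'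
-- the loop over i = 0,1,… is the structural recursion over the successive suffixes of the text
def scanPos (words : List (List Char)) : List Char → Bool
  | [] => false
  | c :: rest => wordsMatchAt words (c :: rest) || scanPos words rest

def is_causally_related_py_alt (event1 : String) (event2 : String) : Bool :=
  let causes : List (List Char) := (["cause", "lead", "result", "trigger"] : List String).map String.toList
  let effects : List (List Char) := (["effect", "outcome", "consequence", "result"] : List String).map String.toList
  scanPos causes (PySem.Str.lower event1).toList && scanPos effects (PySem.Str.lower event2).toList

-- ===== PRECONDITION & SPEC =====
def Spec_is_causally_related_py (event1 : String) (event2 : String) (out : Bool) : Prop := out = is_causally_related_py_alt event1 event2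
instance (event1 : String) (event2 : String) (out : Bool) : Decidable (Spec_is_causally_related_py event1 event2 out) := by unfold Spec_is_causally_related_py; infer_instance

-- ===== CLAIM (what is proved, stated in full; the proofs are below) =====
def Claim_equal_is_causally_related_py : Prop := ∀ (event1 : String) (event2 : String), Dom_is_causally_related_py event1 event2 → Spec_is_causally_related_py event1 event2 (is_causally_related_py event1 event2)

-- ===== LEMMAS AND PROOFS =====

theorem innerLoopA_eq_any (e2 : String) (l : List String) :
    innerLoopA e2 l = l.any (fun e => PySem.Str.isIn e e2) := by
  induction l with
  | nil => rfl
  | cons x xs ih =>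
      simp only [innerLoopA, ih, List.any_cons]
      split_ifs with h <;> simp_all

theorem outerLoopA_eq (e1 e2 : String) (l : List String) :
    outerLoopA e1 e2 l =
      (l.any (fun c => PySem.Str.isIn c e1) && innerLoopA e2 effectIndicators) := by
  induction l with
  | nil => rfl
  | cons x xs ih =>
      simp only [outerLoopA, ih, List.any_cons]
      split_ifs with h1 h2 <;> simp_all

-- the positional scan finds exactly the infix occurrences, provided no keyword is empty
theorem scanPos_eq_true_iff (words : List (List Char)) (chars : List Char)
    (hne : ∀ w ∈ words, w ≠ []) :
    scanPos words chars = true ↔ ∃ w ∈ words, w <:+: chars := by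
  induction chars with
  | nil =>
      simp only [scanPos]
      constructor
      · intro h; exact absurd h (by simp)
      rintro ⟨w, hw, hinf⟩
      exfalso
      exact hne w hw (List.eq_nil_of_infix_nil hinf)
  | cons c rest ih =>
      simp only [scanPos, wordsMatchAt, Bool.or_eq_true, List.any_eq_true,
        List.isPrefixOf_iff_prefix, ih, List.infix_cons_iff]
      constructor
      · rintro (⟨w, hw, hp⟩ | ⟨w, hw, hi⟩)
        · exact ⟨w, hw, Or.inl hp⟩
        · exact ⟨w, hw, Or.inr hi⟩
      · rintro ⟨w, hw, hp | hi⟩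
        · exact Or.inl ⟨w, hw, hp⟩
        · exact Or.inr ⟨w, hw, hi⟩

theorem scanPos_eq_any_isIn (words : List String) (s : String)
    (hne : ∀ w ∈ words, w.toList ≠ []) :
    scanPos (words.map String.toList) s.toList = words.any (fun w => PySem.Str.isIn w s) := by
  rw [Bool.eq_iff_iff]
  rw [scanPos_eq_true_iff _ _ (by simpa using hne)]
  simp only [List.any_eq_true, List.mem_map]
  constructor
  · rintro ⟨w, ⟨v, hv, rfl⟩, hinf⟩
    exact ⟨v, hv, (PySem.Str.isIn_iff_infix _ _).mpr hinf⟩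
  · rintro ⟨v, hv, h⟩
    exact ⟨v.toList, ⟨v, hv, rfl⟩, (PySem.Str.isIn_iff_infix _ _).mp h⟩

-- ===== VERDICT =====
theorem is_causally_related_py_spec : Claim_equal_is_causally_related_py := by
  intro e1 e2 _
  unfold Spec_is_causally_related_py is_causally_related_py is_causally_related_py_alt
  rw [outerLoopA_eq, innerLoopA_eq_any]
  show _ = (scanPos _ _ && scanPos _ _)
  rw [scanPos_eq_any_isIn _ _ (by decide), scanPos_eq_any_isIn _ _ (by decide)]
  rfl
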